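-- pv_equiv track=rewrite | github.com/oyarsa/event_extraction | preprocess/common.py | generate_answer_combined_tags
-- ===== SOURCE A (Python) =====
-- def tag_sort_key(tag: str) -> tuple[int, str]:
--     """Sort tags by the following order: Cause, Relation, Effect.
--     Tags with the same type are sorted alphabetically.
--
--     Args:
--         tag (str): The tag to sort.
--
--     Returns:
--         tuple[int, str]: A pair of tag-based index and the tag itself.
--     """
--     for i, c in enumerate("CRE"):
--         if tag.startswith("[" + c):
--             return i, tag
--     assert False, f"Unknown tag: {tag}"
--
-- _ANSWER_SEPATOR = " | "
--
-- def generate_answer_combined_tags(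
--     events: dict[str, list[str]],
--     label_map: dict[str, str],
--     relation: str | None = None,
-- ) -> str:
--     out = []
--     for ev_type, evs in events.items():
--         event = f"[{label_map[ev_type]}] " + _ANSWER_SEPATOR.join(evs)
--         out.append(event.strip())
--     if relation:
--         out.append(f"[Relation] {relation}")
--     return " ".join(sorted(out, key=tag_sort_key))
-- ===== SOURCE B (Python) =====
-- def generate_answer_combined_tags(events, label_map, relation=None):
--     cause, rel, effect = [], [], []
--     tags = [("[" + label_map[t] + "] " + " | ".join(evs)).strip()
--             for t, evs in events.items()]
--     if relation:
--         tags.append("[Relation] " + relation)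
--     for tag in tags:
--         c = tag[1:2]
--         if c == "C":
--             cause.append(tag)
--         elif c == "R":
--             rel.append(tag)
--         elif c == "E":
--             effect.append(tag)
--         else:
--             raise AssertionError(f"Unknown tag: {tag}")
--     return " ".join(sorted(cause) + sorted(rel) + sorted(effect))
-- ===== Notes on version B (the rewrite author's own statement) =====
-- stated objective: alternative
-- what changed: B replaces the single sorted() with the composite tag_sort_key by a three-way bucket split on the character after the leading '[' followed by three plain alphabetical sorts concatenated Cause/Relation/Effect.
import Mathlib
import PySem

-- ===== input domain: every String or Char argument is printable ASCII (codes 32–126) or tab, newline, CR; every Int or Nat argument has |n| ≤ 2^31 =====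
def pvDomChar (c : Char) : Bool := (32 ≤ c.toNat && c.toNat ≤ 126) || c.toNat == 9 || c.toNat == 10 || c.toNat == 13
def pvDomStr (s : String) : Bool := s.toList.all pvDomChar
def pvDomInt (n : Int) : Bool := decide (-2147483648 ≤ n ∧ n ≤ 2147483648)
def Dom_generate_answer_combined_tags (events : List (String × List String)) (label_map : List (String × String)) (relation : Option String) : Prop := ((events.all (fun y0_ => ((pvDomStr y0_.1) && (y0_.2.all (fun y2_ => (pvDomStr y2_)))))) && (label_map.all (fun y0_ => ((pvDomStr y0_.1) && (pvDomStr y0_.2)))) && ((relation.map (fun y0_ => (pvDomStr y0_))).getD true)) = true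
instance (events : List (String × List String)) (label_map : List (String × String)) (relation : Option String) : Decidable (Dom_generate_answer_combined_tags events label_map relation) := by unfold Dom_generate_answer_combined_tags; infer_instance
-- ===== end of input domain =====

-- B buckets tags by the character after the leading '[' and concatenates three plain sorts
-- instead of one sorted() with the composite tag_sort_key (alternative decomposition, same cost).


-- ===== PORT A =====
def pvAnswerSep : String := " | "

-- tag_sort_key, transliterated; the `assert False` branch is modelled as `none` (excluded by Pre_)
def tagSortKeyAux (tag : String) : List (Int × Char) → Option (Int × String)
  | [] => none
  | (i, c) :: rest =>
      if PySem.Str.startswith tag (String.ofList ['[', c]) then some (i, tag)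
      else tagSortKeyAux tag rest

def tag_sort_key (tag : String) : Option (Int × String) :=
  tagSortKeyAux tag (PySem.List.enumerate "CRE".toList 0)

-- total first component of the sort key; default 3 is the assert case, excluded by Pre_
def tagIdx (tag : String) : Int := ((tag_sort_key tag).map Prod.fst).getD 3

def generate_answer_combined_tags (events : List (String × List String)) (label_map : List (String × String)) (relation : Option String) : String :=
  -- label_map[ev_type]: total form via getD ""; Pre_ excludes the KeyError case
  let out := events.foldl (fun out p =>
      out ++ [PySem.Str.strip ("[" ++ PySem.Dict.getD (PySem.Dict.mk label_map) p.1 "" ++ "] " ++ PySem.Str.join pvAnswerSep p.2)]) []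
  let out := match relation with
    | some r => if r ≠ "" then out ++ ["[Relation] " ++ r] else out
    | none => out
  PySem.Str.join " " (PySem.List.sorted2 out tagIdx (fun t => t) false)

-- ===== PORT B =====
def generate_answer_combined_tags_alt (events : List (String × List String)) (label_map : List (String × String)) (relation : Option String) : String :=
  let tags := events.map (fun p =>
      PySem.Str.strip ("[" ++ PySem.Dict.getD (PySem.Dict.mk label_map) p.1 "" ++ "] " ++ PySem.Str.join " | " p.2))
  let tags := match relation with
    | some r => if r ≠ "" then tags ++ ["[Relation] " ++ r] else tags
    | none => tags
  let buckets := tags.foldl (fun (b : List String × List String × List String) tag =>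
      let c := PySem.Str.slice tag (some 1) (some 2)
      if c = "C" then (b.1 ++ [tag], b.2.1, b.2.2)
      else if c = "R" then (b.1, b.2.1 ++ [tag], b.2.2)
      else if c = "E" then (b.1, b.2.1, b.2.2 ++ [tag])
      else b   -- Python raises AssertionError here; Pre_ excludes it
    ) ([], [], [])
  PySem.Str.join " " (PySem.List.sorted buckets.1 (fun t => t) false
    ++ PySem.List.sorted buckets.2.1 (fun t => t) false
    ++ PySem.List.sorted buckets.2.2 (fun t => t) false)

-- ===== PRECONDITION & SPEC =====
-- Pre_ = exactly the inputs where Python A returns: every event type is a key of label_map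
-- (else KeyError) and its label starts with C, R or E (else tag_sort_key's AssertionError).
def Pre_generate_answer_combined_tags (events : List (String × List String)) (label_map : List (String × String)) (relation : Option String) : Prop :=
  (events.all (fun p =>
    match (PySem.Dict.mk label_map).get? p.1 with
    | some v => PySem.Str.startswith v "C" || PySem.Str.startswith v "R" || PySem.Str.startswith v "E"
    | none => false)) = true
instance (events : List (String × List String)) (label_map : List (String × String)) (relation : Option String) : Decidable (Pre_generate_answer_combined_tags events label_map relation) := by unfold Pre_generate_answer_combined_tags; infer_instance

def pvWitness_generate_answer_combined_tags : (List (String × List String)) × (List (String × String)) × Option String :=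
  ([("c", ["a rose", "it rained"]), ("e", ["it got wet"])], [("c", "Cause"), ("e", "Effect")], some "caused")

def Spec_generate_answer_combined_tags (events : List (String × List String)) (label_map : List (String × String)) (relation : Option String) (out : String) : Prop := out = generate_answer_combined_tags_alt events label_map relation
instance (events : List (String × List String)) (label_map : List (String × String)) (relation : Option String) (out : String) : Decidable (Spec_generate_answer_combined_tags events label_map relation out) := by unfold Spec_generate_answer_combined_tags; infer_instance

-- ===== CLAIM (what is proved, stated in full; the proofs are below) =====
def Claim_equal_generate_answer_combined_tags : Prop := ∀ (events : List (String × List String)) (label_map : List (String × String)) (relation : Option String), Dom_generate_answer_combined_tags events label_map relation → Pre_generate_answer_combined_tags events label_map relation → Spec_generate_answer_combined_tags events label_map relation (generate_answer_combined_tags events label_map relation)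

-- ===== LEMMAS AND PROOFS =====

-- the composite sort key (i, tag) of tag_sort_key, as one lexicographic key (proof-side only)
def pvKey (idx : String → Int) (t : String) : Int ×ₗ String := toLex (idx t, t)

-- shape of every tag the ports build under Pre_: '[' then a C/R/E character
def Shaped (t : String) : Prop := ∃ ch r, t.toList = '[' :: ch :: r ∧ (ch = 'C' ∨ ch = 'R' ∨ ch = 'E')

theorem pvKey_inj (idx : String → Int) : Function.Injective (pvKey idx) := by
  intro a b h
  have := congrArg (fun x => (ofLex x).2) h
  simpa [pvKey] using this

theorem sorted2_eq (idx : String → Int) (l : List String) :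
    PySem.List.sorted2 l idx (fun t => t) false = PySem.List.sorted l (pvKey idx) false := by
  unfold PySem.List.sorted2 PySem.List.sorted
  simp only [if_neg (by decide : ¬ (false = true))]
  have hb : (fun a b => decide (idx a < idx b) || (!decide (idx b < idx a) && decide (a < b)))
      = (fun a b : String => decide (pvKey idx a < pvKey idx b)) := by
    funext a b
    simp only [pvKey, Prod.Lex.toLex_lt_toLex]
    rcases lt_trichotomy (idx a) (idx b) with h|h|h
    · simp [h, not_lt.2 h.le, h.ne]
    · simp [h]
    · simp [h, not_lt.2 h.le, h.ne']
  rw [hb]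

theorem filter_partition (idx : String → Int) (l : List String)
    (H : ∀ t ∈ l, idx t = 0 ∨ idx t = 1 ∨ idx t = 2) :
    (l.filter (fun t => decide (idx t = 0)) ++ l.filter (fun t => decide (idx t = 1))
      ++ l.filter (fun t => decide (idx t = 2))).Perm l := by
  induction l with
  | nil => simp
  | cons x xs ih =>
    have hx := H x (by simp)
    have ih' := ih (fun t ht => H t (by simp [ht]))
    rcases hx with h|h|h
    · simpa [List.filter_cons, h] using ih'.cons x
    · simp only [List.filter_cons, h]
      norm_num
      rw [List.append_assoc] at ih'
      exact List.perm_middle.trans (ih'.cons x)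
    · simp only [List.filter_cons, h]
      norm_num
      rw [← List.append_assoc]
      exact List.perm_middle.trans (ih'.cons x)

theorem key_le_of_same (idx : String → Int) {a b : String} (ha : idx a = idx b) (hab : a ≤ b) :
    pvKey idx a ≤ pvKey idx b := by
  simp [pvKey, Prod.Lex.toLex_le_toLex, ha, hab]

theorem key_le_of_lt (idx : String → Int) {a b : String} (h : idx a < idx b) :
    pvKey idx a ≤ pvKey idx b := by
  simp [pvKey, Prod.Lex.toLex_le_toLex, h]

theorem sorted_buckets (idx : String → Int) (l : List String)
    (H : ∀ t ∈ l, idx t = 0 ∨ idx t = 1 ∨ idx t = 2) :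
    PySem.List.sorted (l.filter (fun t => decide (idx t = 0))) (fun t => t) false
      ++ PySem.List.sorted (l.filter (fun t => decide (idx t = 1))) (fun t => t) false
      ++ PySem.List.sorted (l.filter (fun t => decide (idx t = 2))) (fun t => t) false
    = PySem.List.sorted l (pvKey idx) false := by
  have hmem : ∀ (i : Int), ∀ t ∈ PySem.List.sorted (l.filter (fun t => decide (idx t = i))) (fun t => t) false,
      idx t = i := by
    intro i t ht
    rw [PySem.List.mem_sorted] at ht
    exact of_decide_eq_true (List.mem_filter.1 ht).2
  have hbucket : ∀ (i : Int), List.Pairwise (fun a b => pvKey idx a ≤ pvKey idx b)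
      (PySem.List.sorted (l.filter (fun t => decide (idx t = i))) (fun t => t) false) := by
    intro i
    refine List.Pairwise.imp_of_mem ?_ (PySem.List.sorted_pairwise (l.filter (fun t => decide (idx t = i))) (fun t => t))
    intro a b ha hb hab
    exact key_le_of_same idx ((hmem i a ha).trans (hmem i b hb).symm) hab
  refine PySem.List.eq_of_perm_of_pairwise_le_of_injective (κ := Int ×ₗ String) (pvKey idx) (pvKey_inj idx) ?_ ?_ (PySem.List.sorted_pairwise l (pvKey idx))
  · refine List.Perm.trans ?_ ((filter_partition idx l H).trans (PySem.List.sorted_perm l (pvKey idx) false).symm)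
    exact (((PySem.List.sorted_perm _ _ _).append (PySem.List.sorted_perm _ _ _)).append (PySem.List.sorted_perm _ _ _))
  · rw [List.pairwise_append, List.pairwise_append]
    refine ⟨⟨hbucket 0, hbucket 1, ?_⟩, hbucket 2, ?_⟩
    · intro a ha b hb
      exact key_le_of_lt idx (by rw [hmem 0 a ha, hmem 1 b hb]; norm_num)
    · intro a ha b hb
      rcases List.mem_append.1 ha with h|h
      · exact key_le_of_lt idx (by rw [hmem 0 a h, hmem 2 b hb]; norm_num)
      · exact key_le_of_lt idx (by rw [hmem 1 a h, hmem 2 b hb]; norm_num)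

theorem startswith_shape {t : String} {ch : Char} {r : List Char} (h : t.toList = '[' :: ch :: r) (c : Char) :
    PySem.Str.startswith t (String.ofList ['[', c]) = (c == ch) := by
  simp [PySem.Str.startswith, PySem.Chars.startswith, h, List.isPrefixOf]

theorem tagIdx_shape {t : String} {ch : Char} {r : List Char} (h : t.toList = '[' :: ch :: r) :
    tagIdx t = if ch = 'C' then 0 else if ch = 'R' then 1 else if ch = 'E' then 2 else 3 := by
  have he : PySem.List.enumerate "CRE".toList 0 = [((0:Int),'C'), (1,'R'), (2,'E')] := by decide
  simp only [tagIdx, tag_sort_key, he, tagSortKeyAux, startswith_shape h]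
  by_cases h1 : ch = 'C'
  · simp [h1]
  · rw [if_neg (fun hh => h1 (eq_of_beq hh).symm), if_neg h1]
    by_cases h2 : ch = 'R'
    · simp [h2]
    · rw [if_neg (fun hh => h2 (eq_of_beq hh).symm), if_neg h2]
      by_cases h3 : ch = 'E'
      · simp [h3]
      · rw [if_neg (fun hh => h3 (eq_of_beq hh).symm), if_neg h3]; rfl

theorem slice_shape {t : String} {ch : Char} {r : List Char} (h : t.toList = '[' :: ch :: r) :
    PySem.Str.slice t (some 1) (some 2) = String.ofList [ch] := by
  rw [PySem.Str.slice, PySem.Chars.slice, h,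
    show (some (1:Int)) = some ((1:Nat) : Int) from rfl,
    show (some (2:Int)) = some ((2:Nat) : Int) from rfl,
    PySem.List.slice_natCast]
  rfl

theorem rstrip_ne_nil {ys : List Char} {c : Char} (hc : c ∈ ys) (hs : PySem.Chars.isspace c = false) :
    PySem.Chars.rstrip ys ≠ [] := by
  unfold PySem.Chars.rstrip
  intro h
  rw [List.reverse_eq_nil_iff, List.dropWhile_eq_nil_iff] at h
  have := h c (by simpa using hc)
  simp [hs] at this

theorem rstrip_append {xs ys : List Char} (h : PySem.Chars.rstrip ys ≠ []) :
    PySem.Chars.rstrip (xs ++ ys) = xs ++ PySem.Chars.rstrip ys := by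
  unfold PySem.Chars.rstrip at *
  rw [List.reverse_append, List.dropWhile_append]
  split
  · next hemp =>
      exfalso; apply h
      simp only [List.isEmpty_iff] at hemp
      rw [hemp]; rfl
  · rw [List.reverse_append, List.reverse_reverse]

theorem lstrip_cons {c : Char} {l : List Char} (h : PySem.Chars.isspace c = false) :
    PySem.Chars.lstrip (c :: l) = c :: l := by
  unfold PySem.Chars.lstrip
  rw [List.dropWhile_cons_of_neg (by simp [h])]

-- shape of a stripped event tag "[<v>] <j>" when v = ch :: vr
theorem event_tag_shape {v : String} {ch : Char} {vr : List Char} (hv : v.toList = ch :: vr) (j : String) :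
    ∃ rest, (PySem.Str.strip ("[" ++ v ++ "] " ++ j)).toList
      = '[' :: ch :: rest := by
  have hl : ("[" ++ v ++ "] " ++ j).toList = ('[' :: ch :: vr) ++ (']' :: ' ' :: j.toList) := by
    simp [hv]
  refine ⟨vr ++ PySem.Chars.rstrip (']' :: ' ' :: j.toList), ?_⟩
  rw [PySem.Str.strip, PySem.Chars.strip, hl]
  have hne : PySem.Chars.rstrip (']' :: ' ' :: j.toList) ≠ [] :=
    rstrip_ne_nil (c := ']') (by simp) (by decide)
  rw [show ('[' :: ch :: vr) ++ (']' :: ' ' :: j.toList) = '[' :: ((ch :: vr) ++ (']' :: ' ' :: j.toList)) from rfl,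
    lstrip_cons (by decide),
    show ('[' :: ((ch :: vr) ++ (']' :: ' ' :: j.toList))) = ('[' :: ch :: vr) ++ (']' :: ' ' :: j.toList) from rfl,
    rstrip_append hne]
  simp

theorem relation_tag_shape (r : String) :
    ∃ rest, ("[Relation] " ++ r).toList = '[' :: 'R' :: rest := by
  refine ⟨"elation] ".toList ++ r.toList, ?_⟩
  rw [show ("[Relation] " ++ r).toList = "[Relation] ".toList ++ r.toList by simp]
  rfl

-- classification by the char after '[' agrees with tag_sort_key's index, for shaped tags
theorem bridge_C {t : String} (hs : Shaped t) :
    (decide (PySem.Str.slice t (some 1) (some 2) = "C")) = decide (tagIdx t = 0) := by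
  obtain ⟨ch, r, h, hcre⟩ := hs
  rw [slice_shape h, tagIdx_shape h]
  rcases hcre with h1|h1|h1 <;> subst h1 <;> decide

theorem bridge_R {t : String} (hs : Shaped t) :
    (decide (PySem.Str.slice t (some 1) (some 2) = "R")) = decide (tagIdx t = 1) := by
  obtain ⟨ch, r, h, hcre⟩ := hs
  rw [slice_shape h, tagIdx_shape h]
  rcases hcre with h1|h1|h1 <;> subst h1 <;> decide

theorem bridge_E {t : String} (hs : Shaped t) :
    (decide (PySem.Str.slice t (some 1) (some 2) = "E")) = decide (tagIdx t = 2) := by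
  obtain ⟨ch, r, h, hcre⟩ := hs
  rw [slice_shape h, tagIdx_shape h]
  rcases hcre with h1|h1|h1 <;> subst h1 <;> decide

theorem tagIdx_mem {t : String} (hs : Shaped t) :
    tagIdx t = 0 ∨ tagIdx t = 1 ∨ tagIdx t = 2 := by
  obtain ⟨ch, r, h, hcre⟩ := hs
  rw [tagIdx_shape h]
  rcases hcre with h1|h1|h1 <;> subst h1 <;> decide

-- A's append loop is a map
theorem foldl_append_map {α β : Type} (f : α → β) (l : List α) (acc : List β) :
    l.foldl (fun out p => out ++ [f p]) acc = acc ++ l.map f := by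
  induction l generalizing acc with
  | nil => simp
  | cons x xs ih => simp [ih]

-- B's bucket loop is three filters
theorem buckets_eq (l : List String) (b : List String × List String × List String) :
    l.foldl (fun (b : List String × List String × List String) tag =>
      if PySem.Str.slice tag (some 1) (some 2) = "C" then (b.1 ++ [tag], b.2.1, b.2.2)
      else if PySem.Str.slice tag (some 1) (some 2) = "R" then (b.1, b.2.1 ++ [tag], b.2.2)
      else if PySem.Str.slice tag (some 1) (some 2) = "E" then (b.1, b.2.1, b.2.2 ++ [tag])
      else b) b
    = (b.1 ++ l.filter (fun t => decide (PySem.Str.slice t (some 1) (some 2) = "C")),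
       b.2.1 ++ l.filter (fun t => decide (PySem.Str.slice t (some 1) (some 2) = "R")),
       b.2.2 ++ l.filter (fun t => decide (PySem.Str.slice t (some 1) (some 2) = "E"))) := by
  induction l generalizing b with
  | nil => simp
  | cons x xs ih =>
    simp only [List.foldl_cons, List.filter_cons]
    by_cases h1 : PySem.Str.slice x (some 1) (some 2) = "C"
    · simp [h1, ih, List.append_assoc]
    · by_cases h2 : PySem.Str.slice x (some 1) (some 2) = "R"
      · simp [h2, ih, List.append_assoc]
      · by_cases h3 : PySem.Str.slice x (some 1) (some 2) = "E"
        · simp [h3, ih, List.append_assoc]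
        · simp [h1, h2, h3, ih]

-- the core equality, on any list of shaped tags
theorem core_eq (l : List String) (H : ∀ t ∈ l, Shaped t) :
    (PySem.List.sorted (l.foldl (fun (b : List String × List String × List String) tag =>
        if PySem.Str.slice tag (some 1) (some 2) = "C" then (b.1 ++ [tag], b.2.1, b.2.2)
        else if PySem.Str.slice tag (some 1) (some 2) = "R" then (b.1, b.2.1 ++ [tag], b.2.2)
        else if PySem.Str.slice tag (some 1) (some 2) = "E" then (b.1, b.2.1, b.2.2 ++ [tag])
        else b) ([], [], [])).1 (fun t => t) false
      ++ PySem.List.sorted (l.foldl (fun (b : List String × List String × List String) tag =>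
        if PySem.Str.slice tag (some 1) (some 2) = "C" then (b.1 ++ [tag], b.2.1, b.2.2)
        else if PySem.Str.slice tag (some 1) (some 2) = "R" then (b.1, b.2.1 ++ [tag], b.2.2)
        else if PySem.Str.slice tag (some 1) (some 2) = "E" then (b.1, b.2.1, b.2.2 ++ [tag])
        else b) ([], [], [])).2.1 (fun t => t) false
      ++ PySem.List.sorted (l.foldl (fun (b : List String × List String × List String) tag =>
        if PySem.Str.slice tag (some 1) (some 2) = "C" then (b.1 ++ [tag], b.2.1, b.2.2)
        else if PySem.Str.slice tag (some 1) (some 2) = "R" then (b.1, b.2.1 ++ [tag], b.2.2)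
        else if PySem.Str.slice tag (some 1) (some 2) = "E" then (b.1, b.2.1, b.2.2 ++ [tag])
        else b) ([], [], [])).2.2 (fun t => t) false)
    = PySem.List.sorted2 l tagIdx (fun t => t) false := by
  rw [buckets_eq l ([], [], [])]
  simp only [List.nil_append]
  rw [List.filter_congr (fun t ht => bridge_C (H t ht)),
      List.filter_congr (fun t ht => bridge_R (H t ht)),
      List.filter_congr (fun t ht => bridge_E (H t ht)),
      sorted2_eq]
  exact sorted_buckets tagIdx l (fun t ht => tagIdx_mem (H t ht))

-- ===== VERDICT (by name: the statement is the Claim_ definition above) =====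
theorem generate_answer_combined_tags_spec : Claim_equal_generate_answer_combined_tags := by
  intro events label_map relation hdom hpre
  unfold Spec_generate_answer_combined_tags
  unfold Pre_generate_answer_combined_tags at hpre
  rw [List.all_eq_true] at hpre
  simp only [generate_answer_combined_tags, generate_answer_combined_tags_alt, pvAnswerSep]
  rw [foldl_append_map, List.nil_append]
  have Hmap : ∀ t ∈ (events.map (fun p =>
      PySem.Str.strip ("[" ++ PySem.Dict.getD (PySem.Dict.mk label_map) p.1 "" ++ "] " ++ PySem.Str.join " | " p.2))), Shaped t := by
    intro t ht
    rw [List.mem_map] at ht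
    obtain ⟨p, hp, rfl⟩ := ht
    have hp' := hpre p hp
    revert hp'
    cases hget : (PySem.Dict.mk label_map).get? p.1 with
    | none => intro hp'; simp at hp'
    | some v =>
      intro hp'
      simp only [Bool.or_eq_true] at hp'
      have hgetD : PySem.Dict.getD (PySem.Dict.mk label_map) p.1 "" = v := by
        simp [PySem.Dict.getD, hget]
      rw [hgetD]
      have hv : ∃ ch vr, v.toList = ch :: vr ∧ (ch = 'C' ∨ ch = 'R' ∨ ch = 'E') := by
        rcases hp' with (h|h)|h
        · rcases hsw : v.toList with _|⟨c, cs⟩ <;>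
            simp [PySem.Str.startswith, PySem.Chars.startswith, hsw, List.isPrefixOf] at h
          exact ⟨c, cs, rfl, Or.inl (by simpa [eq_comm] using h)⟩
        · rcases hsw : v.toList with _|⟨c, cs⟩ <;>
            simp [PySem.Str.startswith, PySem.Chars.startswith, hsw, List.isPrefixOf] at h
          exact ⟨c, cs, rfl, Or.inr (Or.inl (by simpa [eq_comm] using h))⟩
        · rcases hsw : v.toList with _|⟨c, cs⟩ <;>
            simp [PySem.Str.startswith, PySem.Chars.startswith, hsw, List.isPrefixOf] at h
          exact ⟨c, cs, rfl, Or.inr (Or.inr (by simpa [eq_comm] using h))⟩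
      obtain ⟨ch, vr, hv1, hv2⟩ := hv
      obtain ⟨rest, hrest⟩ := event_tag_shape hv1 (PySem.Str.join " | " p.2)
      exact ⟨ch, rest, hrest, hv2⟩
  cases relation with
  | none =>
    exact congrArg (PySem.Str.join " ") (core_eq _ Hmap).symm
  | some r =>
    by_cases hr : r = ""
    · simp only [hr, ne_eq, not_true_eq_false, if_false]
      exact congrArg (PySem.Str.join " ") (core_eq _ Hmap).symm
    · simp only [ne_eq, hr, not_false_eq_true, if_true]
      refine congrArg (PySem.Str.join " ") (core_eq _ ?_).symm
      intro t ht
      rcases List.mem_append.1 ht with h|h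
      · exact Hmap t h
      · obtain ⟨rest, hrest⟩ := relation_tag_shape r
        rw [List.mem_singleton.1 h]
        exact ⟨'R', rest, hrest, Or.inr (Or.inl rfl)⟩
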